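-- pv_equiv track=rewrite | github.com/mwang840/LanguagePractice | Python/palindromicArray.py | PalinArray
-- ===== SOURCE A (Python) =====
-- def PalinArray(arr ,n):
--     for a in arr:
--         string = str(a)
--         currentLength = len(string)
--         for i in range(currentLength):
--             if string[i] !=string[i - 1]:
--                 return 0
--     return 1
-- ===== SOURCE B (Python) =====
-- def PalinArray(arr, n):
--     return int(all(len(set(str(a))) == 1 for a in arr))
-- ===== Notes on version B (the rewrite author's own statement) =====
-- stated objective: simpler
-- what changed: Replaces A's nested index loop comparing each character of str(a) to its cyclic predecessor (with early return) by a one-liner that collects the distinct characters of str(a) into a set and tests that its cardinality is 1 for all elements.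
import Mathlib
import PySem

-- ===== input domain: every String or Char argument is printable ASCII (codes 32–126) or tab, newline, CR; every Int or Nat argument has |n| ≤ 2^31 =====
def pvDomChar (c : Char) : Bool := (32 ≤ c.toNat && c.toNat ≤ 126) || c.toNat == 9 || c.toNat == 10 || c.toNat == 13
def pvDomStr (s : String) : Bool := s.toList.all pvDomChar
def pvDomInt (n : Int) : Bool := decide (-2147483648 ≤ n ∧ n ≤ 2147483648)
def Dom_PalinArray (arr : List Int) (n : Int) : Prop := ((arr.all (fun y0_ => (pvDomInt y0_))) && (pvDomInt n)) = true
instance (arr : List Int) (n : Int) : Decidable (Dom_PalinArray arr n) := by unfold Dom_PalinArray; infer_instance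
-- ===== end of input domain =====

-- B is simpler: one membership/set pass per element (distinct characters of str(a)) instead of
-- A's index loop comparing each character with its cyclic predecessor; same exact behaviour.

-- ===== PORT A =====
-- literal port of A: outer loop with early `return 0`; inner loop over range(len(string))
-- compares string[i] with string[i-1] (i = 0 uses Python's negative index -1 = last char).
def PalinArray : List Int → Int → Int
  | [], _ => 1
  | a :: rest, n =>
    let string := PySem.Int.toChars a
    let currentLength := PySem.List.len string
    if (PySem.List.pyRange 0 currentLength 1).all
        (fun i => PySem.List.pyGet? string i == PySem.List.pyGet? string (i - 1))
    then PalinArray rest n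
    else 0

-- ===== PORT B =====
-- port of Source B: int(all(len(set(str(a))) == 1 for a in arr))
def PalinArray_alt (arr : List Int) (n : Int) : Int :=
  if arr.all (fun a => PySem.Set.len (PySem.Set.ofList (PySem.Int.toChars a)) == 1)
  then 1 else 0

-- ===== PRECONDITION & SPEC =====
def Spec_PalinArray (arr : List Int) (n : Int) (out : Int) : Prop := out = PalinArray_alt arr n
instance (arr : List Int) (n : Int) (out : Int) : Decidable (Spec_PalinArray arr n out) := by unfold Spec_PalinArray; infer_instance

-- ===== CLAIM (what is proved, stated in full; the proofs are below) =====
def Claim_equal_PalinArray : Prop := ∀ (arr : List Int) (n : Int), Dom_PalinArray arr n → Spec_PalinArray arr n (PalinArray arr n)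

-- ===== LEMMAS AND PROOFS =====

-- str(a) is never empty
theorem toDigitsCore_length_mono (b : Nat) : ∀ (fuel n : Nat) (ds : List Char),
    ds.length ≤ (Nat.toDigitsCore b fuel n ds).length := by
  intro fuel
  induction fuel with
  | zero => intro n ds; simp [Nat.toDigitsCore]
  | succ f ih =>
    intro n ds
    simp only [Nat.toDigitsCore]
    split
    · simp
    · exact le_trans (by simp) (ih _ _)

theorem toDigitsCore_length_lt (b : Nat) (f n : Nat) (ds : List Char) :
    ds.length < (Nat.toDigitsCore b (f + 1) n ds).length := by
  simp only [Nat.toDigitsCore]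
  split
  · simp
  · exact lt_of_lt_of_le (by simp) (toDigitsCore_length_mono b f _ _)

theorem toChars_ne_nil (a : Int) : PySem.Int.toChars a ≠ [] := by
  unfold PySem.Int.toChars
  split
  · simp
  · intro h
    have := toDigitsCore_length_lt 10 a.toNat a.toNat []
    simp only [Nat.toDigits] at h
    rw [h] at this
    simp at this

-- set side: length of foldl add never shrinks
theorem foldl_add_length_mono (t : List Char) : ∀ (s : PySem.Set Char),
    s.length ≤ (t.foldl PySem.Set.add s).length := by
  induction t with
  | nil => intro s; simp
  | cons x t ih =>
    intro s
    refine le_trans ?_ (ih (PySem.Set.add s x))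
    simp only [PySem.Set.add]
    split <;> simp

theorem set_singleton_iff (c : Char) (t : List Char) :
    ((t.foldl PySem.Set.add [c]).length = 1) ↔ (∀ x ∈ t, x = c) := by
  induction t with
  | nil => simp
  | cons x t ih =>
    simp only [List.foldl_cons, List.mem_cons, forall_eq_or_imp]
    by_cases hx : x = c
    · subst hx
      have : PySem.Set.add [x] x = [x] := by simp [PySem.Set.add, PySem.Set.contains]
      rw [this]
      simpa using ih
    · have : PySem.Set.add [c] x = [c, x] := by
        simp [PySem.Set.add, PySem.Set.contains, hx]
      rw [this]
      constructor
      · intro h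
        have h2 : ([c, x] : List Char).length ≤ (t.foldl PySem.Set.add [c, x]).length :=
          foldl_add_length_mono t [c, x]
        simp at h2
        omega
      · intro h; exact absurd h.1 hx

-- cyclic side: uniformity characterisation of A's inner loop
theorem cyc_iff (c : Char) (t : List Char) :
    ((PySem.List.pyRange 0 (PySem.List.len (c :: t)) 1).all
      (fun i => PySem.List.pyGet? (c :: t) i == PySem.List.pyGet? (c :: t) (i - 1)) = true)
    ↔ (∀ x ∈ t, x = c) := by
  set s : List Char := c :: t with hs
  have hslen : s.length = t.length + 1 := by rw [hs]; rfl
  have hlen : PySem.List.len s = ((s.length : Nat) : Int) := by simp [PySem.List.len_eq]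
  rw [hlen, PySem.List.pyRange_zero_natCast]
  rw [List.all_eq_true]
  simp only [List.mem_map, List.mem_range]
  constructor
  · intro H
    -- first: every s[k] = c, by induction on k
    have key : ∀ k, (hk : k < s.length) → s[k] = c := by
      intro k
      induction k with
      | zero => intro _; simp [hs]
      | succ j ihj =>
        intro hk
        have hj : j < s.length := by omega
        have hH := H (((j+1 : Nat) : Int)) ⟨j+1, hk, rfl⟩
        have hcast : ((j+1 : Nat) : Int) - 1 = ((j : Nat) : Int) := by push_cast; ring
        rw [hcast, PySem.List.pyGet?_natCast, PySem.List.pyGet?_natCast,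
            List.getElem?_eq_getElem hk, List.getElem?_eq_getElem hj] at hH
        have heq : s[j+1] = s[j] := by simpa using hH
        rw [heq]
        exact ihj hj
    intro x hx
    obtain ⟨j, hj, hxe⟩ := List.mem_iff_getElem.mp hx
    have : s[j+1] = c := key (j+1) (by omega)
    rw [← hxe]
    simpa [hs] using this
  · intro h y hy
    obtain ⟨k, hk, rfl⟩ := hy
    have hall : ∀ x ∈ s, x = c := by
      intro x hx
      rcases List.mem_cons.mp hx with h1 | h2
      · exact h1
      · exact h x h2
    have h1 : PySem.List.pyGet? s (k : Int) = some c := by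
      rw [PySem.List.pyGet?_natCast, List.getElem?_eq_getElem hk]
      exact congrArg some (hall _ (List.getElem_mem hk))
    have h2 : PySem.List.pyGet? s ((k : Int) - 1) = some c := by
      cases k with
      | zero =>
        simp only [Nat.cast_zero, zero_sub]
        rw [PySem.List.pyGet?_neg_one]
        have hne : s ≠ [] := by simp [hs]
        rw [List.getLast?_eq_some_getLast hne]
        exact congrArg some (hall _ (List.getLast_mem hne))
      | succ j =>
        have hcast : ((j+1 : Nat) : Int) - 1 = (j : Int) := by push_cast; ring
        rw [hcast, PySem.List.pyGet?_natCast,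
            List.getElem?_eq_getElem (show j < s.length by omega)]
        exact congrArg some (hall _ (List.getElem_mem _))
    rw [h1, h2]
    simp

-- the two per-element tests agree
theorem elem_eq (a : Int) :
    ((PySem.List.pyRange 0 (PySem.List.len (PySem.Int.toChars a)) 1).all
      (fun i => PySem.List.pyGet? (PySem.Int.toChars a) i ==
                PySem.List.pyGet? (PySem.Int.toChars a) (i - 1)))
    = (PySem.Set.len (PySem.Set.ofList (PySem.Int.toChars a)) == 1) := by
  obtain ⟨c, t, hct⟩ : ∃ c t, PySem.Int.toChars a = c :: t := by
    cases h : PySem.Int.toChars a with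
    | nil => exact absurd h (toChars_ne_nil a)
    | cons c t => exact ⟨c, t, rfl⟩
  rw [hct]
  have hof : PySem.Set.ofList (c :: t) = t.foldl PySem.Set.add [c] := by
    rw [PySem.Set.ofList_eq_foldl]
    simp [PySem.Set.add, PySem.Set.contains]
  rw [hof]
  rw [Bool.eq_iff_iff]
  rw [cyc_iff]
  have : (PySem.Set.len (t.foldl PySem.Set.add [c]) == 1) = true
      ↔ ((t.foldl PySem.Set.add [c]).length = 1) := by
    simp [PySem.Set.len]
  rw [this, set_singleton_iff]

theorem PalinArray_eq_all (arr : List Int) (n : Int) :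
    PalinArray arr n =
      if arr.all (fun a =>
        (PySem.List.pyRange 0 (PySem.List.len (PySem.Int.toChars a)) 1).all
          (fun i => PySem.List.pyGet? (PySem.Int.toChars a) i ==
                    PySem.List.pyGet? (PySem.Int.toChars a) (i - 1)))
      then 1 else 0 := by
  induction arr with
  | nil => simp [PalinArray]
  | cons a rest ih =>
    simp only [PalinArray, List.all_cons]
    rw [ih]
    by_cases h : ((PySem.List.pyRange 0 (PySem.List.len (PySem.Int.toChars a)) 1).all
          (fun i => PySem.List.pyGet? (PySem.Int.toChars a) i ==
                    PySem.List.pyGet? (PySem.Int.toChars a) (i - 1))) = true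
    · simp only [h, Bool.true_and, if_true]
    · have hf := Bool.not_eq_true _ |>.mp h
      simp only [hf, Bool.false_and, Bool.false_eq_true, if_false]

-- ===== VERDICT (by name: the statement is the Claim_ definition above) =====
theorem PalinArray_spec : Claim_equal_PalinArray := by
  intro arr n _
  unfold Spec_PalinArray PalinArray_alt
  rw [PalinArray_eq_all]
  rw [List.all_congr rfl (fun a => elem_eq a)]
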